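-- pv_equiv track=rewrite | github.com/adamhinton/python-upskilling | helpful_snippets.py | get_outside_squares
-- ===== SOURCE A (Python) =====
-- def get_outside_squares(rows, columns):
--     """
--     Enumerates all (row, column) coordinates on the outside of a grid.
--
--     Args:
--         rows (int): The number of rows in the grid.
--         columns (int): The number of columns in the grid.
--
--     Returns:
--         list: A list of tuples representing the coordinates of the outside squares.
--     """
--     if rows <= 0 or columns <= 0:
--         return []
--
--     outside_squares = [
--         (r, c)
--         for r in range(rows)
--         for c in range(columns)
--         if r == 0 or r == rows - 1 or c == 0 or c == columns - 1
--     ]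
--     return outside_squares
-- ===== SOURCE B (Python) =====
-- def get_outside_squares(rows, columns):
--     if rows <= 0 or columns <= 0:
--         return []
--     top = [(0, c) for c in range(columns)]
--     if rows == 1:
--         return top
--     middle = []
--     for r in range(1, rows - 1):
--         if columns > 1:
--             middle.append((r, 0))
--             middle.append((r, columns - 1))
--         else:
--             middle.append((r, 0))
--     bottom = [(rows - 1, c) for c in range(columns)]
--     return top + middle + bottom
-- ===== Notes on version B (the rewrite author's own statement) =====
-- stated objective: faster
-- what changed: Instead of scanning every cell of the rows*columns grid and filtering border cells, B emits the top row, the two border cells of each middle row, and the bottom row directly.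
import Mathlib
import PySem

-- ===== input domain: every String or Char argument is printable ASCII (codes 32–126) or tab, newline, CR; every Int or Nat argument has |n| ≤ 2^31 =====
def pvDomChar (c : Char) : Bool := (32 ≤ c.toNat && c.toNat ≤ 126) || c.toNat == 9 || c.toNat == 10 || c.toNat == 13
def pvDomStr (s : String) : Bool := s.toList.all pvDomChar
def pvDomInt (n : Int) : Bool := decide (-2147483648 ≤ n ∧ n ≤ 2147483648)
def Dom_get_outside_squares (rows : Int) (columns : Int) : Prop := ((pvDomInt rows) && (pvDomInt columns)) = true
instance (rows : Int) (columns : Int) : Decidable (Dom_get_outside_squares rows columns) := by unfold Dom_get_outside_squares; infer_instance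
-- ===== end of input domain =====

-- B enumerates the perimeter directly (top row, two cells per middle row, bottom row)
-- instead of A's filter over the whole rows×columns grid: asymptotically faster, O(rows+columns).

-- ===== PORT A =====
def get_outside_squares (rows : Int) (columns : Int) : List (Int × Int) :=
  if rows ≤ 0 ∨ columns ≤ 0 then []
  else
    (PySem.List.pyRange 0 rows 1).flatMap (fun r =>
      (PySem.List.pyRange 0 columns 1).filterMap (fun c =>
        if r = 0 ∨ r = rows - 1 ∨ c = 0 ∨ c = columns - 1 then some (r, c) else none))

-- ===== PORT B =====
def get_outside_squares_alt (rows : Int) (columns : Int) : List (Int × Int) :=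
  if rows ≤ 0 ∨ columns ≤ 0 then []
  else
    let top := (PySem.List.pyRange 0 columns 1).map (fun c => ((0 : Int), c))
    if rows = 1 then top
    else
      let middle := (PySem.List.pyRange 1 (rows - 1) 1).flatMap (fun r =>
        if columns > 1 then [(r, (0 : Int)), (r, columns - 1)] else [(r, (0 : Int))])
      let bottom := (PySem.List.pyRange 0 columns 1).map (fun c => (rows - 1, c))
      top ++ middle ++ bottom

-- ===== PRECONDITION & SPEC =====
def Spec_get_outside_squares (rows : Int) (columns : Int) (out : List (Int × Int)) : Prop := out = get_outside_squares_alt rows columns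
instance (rows : Int) (columns : Int) (out : List (Int × Int)) : Decidable (Spec_get_outside_squares rows columns out) := by unfold Spec_get_outside_squares; infer_instance

-- ===== CLAIM (what is proved, stated in full; the proofs are below) =====
def Claim_equal_get_outside_squares : Prop := ∀ (rows : Int) (columns : Int), Dom_get_outside_squares rows columns → Spec_get_outside_squares rows columns (get_outside_squares rows columns)

-- ===== LEMMAS AND PROOFS =====

-- A's row filter is the full row when the row condition already holds.
theorem row_full (rows columns r : Int) (h : r = 0 ∨ r = rows - 1) :
    (PySem.List.pyRange 0 columns 1).filterMap (fun c =>
      if r = 0 ∨ r = rows - 1 ∨ c = 0 ∨ c = columns - 1 then some (r, c) else none)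
    = (PySem.List.pyRange 0 columns 1).map (fun c => (r, c)) := by
  rw [List.filterMap_eq_map_iff_forall_eq_some.mpr]
  intro c _
  rcases h with h | h <;> simp [h]

-- A's row filter on an interior row keeps exactly the two (or one) border cells.
theorem row_middle (rows columns r : Int) (hc : 0 < columns)
    (h0 : 0 < r) (h1 : r < rows - 1) :
    (PySem.List.pyRange 0 columns 1).filterMap (fun c =>
      if r = 0 ∨ r = rows - 1 ∨ c = 0 ∨ c = columns - 1 then some (r, c) else none)
    = if columns > 1 then [(r, (0 : Int)), (r, columns - 1)] else [(r, (0 : Int))] := by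
  have hr0 : r ≠ 0 := by omega
  have hr1 : r ≠ rows - 1 := by omega
  by_cases hcol : columns > 1
  · have e1 : PySem.List.pyRange 0 columns 1
        = PySem.List.pyRange 0 1 1 ++ PySem.List.pyRange 1 columns 1 :=
      PySem.List.pyRange_one_append 0 1 columns (by omega) (by omega)
    have e2 : PySem.List.pyRange 1 columns 1
        = PySem.List.pyRange 1 (columns - 1) 1 ++ PySem.List.pyRange (columns - 1) columns 1 :=
      PySem.List.pyRange_one_append 1 (columns - 1) columns (by omega) (by omega)
    have e3 : PySem.List.pyRange 0 1 1 = [(0 : Int)] := by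
      simpa using PySem.List.pyRange_one_singleton (0 : Int)
    have e4 : PySem.List.pyRange (columns - 1) columns 1 = [columns - 1] := by
      have := PySem.List.pyRange_one_singleton (columns - 1)
      simpa [show columns - 1 + 1 = columns by ring] using this
    have emid : (PySem.List.pyRange 1 (columns - 1) 1).filterMap (fun c =>
        if r = 0 ∨ r = rows - 1 ∨ c = 0 ∨ c = columns - 1 then some (r, c) else none) = [] := by
      rw [List.filterMap_eq_nil_iff]
      intro c hm
      rw [PySem.List.mem_pyRange_one] at hm
      have : c ≠ 0 := by omega
      have : c ≠ columns - 1 := by omega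
      simp_all
    rw [e1, e2, List.filterMap_append, List.filterMap_append, e3, e4, emid]
    simp [hr0, hr1, hcol]
  · have hce : columns = 1 := by omega
    subst hce
    have e3 : PySem.List.pyRange 0 1 1 = [(0 : Int)] := by
      simpa using PySem.List.pyRange_one_singleton (0 : Int)
    rw [e3]
    simp [hr0, hr1]

-- ===== VERDICT (by name: the statement is the Claim_ definition above) =====
theorem get_outside_squares_spec : Claim_equal_get_outside_squares := by
  intro rows columns _
  unfold Spec_get_outside_squares get_outside_squares get_outside_squares_alt
  by_cases hz : rows ≤ 0 ∨ columns ≤ 0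
  · simp [hz]
  · have hc : 0 < columns := by omega
    have hz' : ¬ (rows ≤ 0 ∨ columns ≤ 0) := hz
    simp only [if_neg hz']
    by_cases h1 : rows = 1
    · subst h1
      have e : PySem.List.pyRange 0 1 1 = [(0 : Int)] := by
        simpa using PySem.List.pyRange_one_singleton (0 : Int)
      simp only [e, List.flatMap_cons, List.flatMap_nil, List.append_nil]
      exact row_full 1 columns 0 (Or.inl rfl)
    · simp only [if_neg h1]
      have hr2 : 2 ≤ rows := by omega
      have e1 : PySem.List.pyRange 0 rows 1
          = PySem.List.pyRange 0 1 1 ++ PySem.List.pyRange 1 rows 1 :=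
        PySem.List.pyRange_one_append 0 1 rows (by omega) (by omega)
      have e2 : PySem.List.pyRange 1 rows 1
          = PySem.List.pyRange 1 (rows - 1) 1 ++ PySem.List.pyRange (rows - 1) rows 1 :=
        PySem.List.pyRange_one_append 1 (rows - 1) rows (by omega) (by omega)
      have e3 : PySem.List.pyRange 0 1 1 = [(0 : Int)] := by
        simpa using PySem.List.pyRange_one_singleton (0 : Int)
      have e4 : PySem.List.pyRange (rows - 1) rows 1 = [rows - 1] := by
        have := PySem.List.pyRange_one_singleton (rows - 1)
        simpa [show rows - 1 + 1 = rows by ring] using this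
      have emid : (PySem.List.pyRange 1 (rows - 1) 1).flatMap (fun r =>
          (PySem.List.pyRange 0 columns 1).filterMap (fun c =>
            if r = 0 ∨ r = rows - 1 ∨ c = 0 ∨ c = columns - 1 then some (r, c) else none))
          = (PySem.List.pyRange 1 (rows - 1) 1).flatMap (fun r =>
            if columns > 1 then [(r, (0 : Int)), (r, columns - 1)] else [(r, (0 : Int))]) := by
        apply List.flatMap_congr
        intro r hm
        rw [PySem.List.mem_pyRange_one] at hm
        exact row_middle rows columns r hc (by omega) (by omega)
      rw [e1, e2, List.flatMap_append, List.flatMap_append, e3, e4,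
          List.flatMap_singleton, List.flatMap_singleton,
          row_full rows columns 0 (Or.inl rfl),
          row_full rows columns (rows - 1) (Or.inr rfl),
          emid, List.append_assoc]
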